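-- pv_equiv track=rewrite | github.com/xinquiry/internbootcamp_v2 | internbootcamp/bootcamps/RLVR_MM/binairo_standalone.py | _backtrack_exploration_analysis
-- ===== SOURCE A (Python) =====
-- def _backtrack_exploration_analysis(grid, solution, size):
--     """Generate backtracking exploration analysis"""
--     exploration_text = "Systematically trying values in empty cells:\n"
--
--     # Find first few empty cells
--     empty_cells = [(i, j) for i in range(size) for j in range(size) if grid[i][j] is None]
--
--     for i, j in empty_cells[:min(2, len(empty_cells))]:
--         exploration_text += f"- For position R{i+1}C{j+1}:\n"
--         exploration_text += f"  - Trying 0: checking row/column balance and consecutive constraints\n"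
--         exploration_text += f"  - Trying 1: checking row/column balance and consecutive constraints\n"
--
--         # Set to solution value
--         grid[i][j] = solution[i][j]
--         exploration_text += f"  - Optimal choice: {solution[i][j]} (satisfies all constraints)\n"
--
--     # Complete remaining cells
--     for i in range(size):
--         for j in range(size):
--             if grid[i][j] is None:
--                 grid[i][j] = solution[i][j]
--
--     return exploration_text
-- ===== SOURCE B (Python) =====
-- def _backtrack_exploration_analysis(grid, solution, size):
--     """Generate backtracking exploration analysis"""
--     exploration_text = "Systematically trying values in empty cells:\n"
--
--     # Single row-major pass: narrate the first two empty cells and fill every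
--     # empty cell from the solution as we go (same mutation effect as A).
--     explored = 0
--     for i in range(size):
--         for j in range(size):
--             if grid[i][j] is None:
--                 if explored < 2:
--                     exploration_text += (
--                         f"- For position R{i+1}C{j+1}:\n"
--                         "  - Trying 0: checking row/column balance and consecutive constraints\n"
--                         "  - Trying 1: checking row/column balance and consecutive constraints\n"
--                         f"  - Optimal choice: {solution[i][j]} (satisfies all constraints)\n"
--                     )
--                     explored += 1
--                 grid[i][j] = solution[i][j]
--     return exploration_text
-- ===== Notes on version B (the rewrite author's own statement) =====
-- stated objective: alternative
-- what changed: B replaces A's three traversals (a comprehension building the full empty_cells list, a loop over its first-two slice, and a second full-grid rescan) with one row-major pass that keeps a counter of empty cells seen, emitting the narration for the first two and filling every empty cell in the same sweep.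
import Mathlib
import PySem

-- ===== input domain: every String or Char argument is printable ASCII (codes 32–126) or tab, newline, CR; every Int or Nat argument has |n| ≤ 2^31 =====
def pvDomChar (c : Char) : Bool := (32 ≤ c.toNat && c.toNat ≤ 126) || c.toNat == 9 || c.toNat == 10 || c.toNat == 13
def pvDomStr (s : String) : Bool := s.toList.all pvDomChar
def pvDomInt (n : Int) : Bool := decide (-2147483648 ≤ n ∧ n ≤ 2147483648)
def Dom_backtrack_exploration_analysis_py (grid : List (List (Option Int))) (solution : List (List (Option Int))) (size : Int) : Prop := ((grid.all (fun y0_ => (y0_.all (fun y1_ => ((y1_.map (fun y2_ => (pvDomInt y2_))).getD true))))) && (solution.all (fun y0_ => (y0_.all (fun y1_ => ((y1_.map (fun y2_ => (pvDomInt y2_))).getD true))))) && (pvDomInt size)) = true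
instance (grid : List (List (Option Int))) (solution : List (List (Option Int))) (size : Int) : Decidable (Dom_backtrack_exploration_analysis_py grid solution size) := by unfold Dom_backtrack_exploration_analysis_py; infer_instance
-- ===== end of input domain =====

-- B makes one row-major counted pass instead of A's list-build + slice + rescan; return values agree
-- (both Pythons also mutate `grid` identically; the equivalence proved here is about the return value only).

-- shared cell access: m[i][j] as an Option (none = IndexError on that access)
def pvCell (m : List (List (Option Int))) (i j : Int) : Option (Option Int) :=
  (PySem.List.pyGet? m i).bind (fun row => PySem.List.pyGet? row j)

-- the four f-string lines appended for one narrated cell (identical literal text in A and B)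
def pvMsg (solution : List (List (Option Int))) (i j : Int) : String :=
  "- For position R" ++ PySem.Int.toStr (i+1) ++ "C" ++ PySem.Int.toStr (j+1) ++ ":\n"
    ++ "  - Trying 0: checking row/column balance and consecutive constraints\n"
    ++ "  - Trying 1: checking row/column balance and consecutive constraints\n"
    ++ "  - Optimal choice: "
    ++ (match PySem.List.pyGetD (PySem.List.pyGetD solution i []) j none with
        | some n => PySem.Int.toStr n
        | none => "None")
    ++ " (satisfies all constraints)\n"

-- ===== PORT A =====
-- literal port of A's text computation; the trailing fill-in loop only mutates `grid`
-- and never touches the returned string, so it contributes nothing here.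
def backtrack_exploration_analysis_py (grid : List (List (Option Int))) (solution : List (List (Option Int))) (size : Int) : String :=
  let exploration_text := "Systematically trying values in empty cells:\n"
  let empty_cells := (PySem.List.pyRange 0 size 1).flatMap (fun i =>
    (PySem.List.pyRange 0 size 1).filterMap (fun j =>
      if pvCell grid i j = some none then some (i, j) else none))
  (PySem.List.slice empty_cells (some 0) (some (min 2 (empty_cells.length : Int)))).foldl
    (fun s p => s ++ pvMsg solution p.1 p.2) exploration_text

-- ===== PORT B =====
-- literal port of Source B: one nested pass carrying (text, counter); the in-place fill of `grid`
-- never affects a later `grid[i][j] is None` test (each cell is read before it could be written),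
-- so the state carries only the returned text and the counter.
def backtrack_exploration_analysis_py_alt (grid : List (List (Option Int))) (solution : List (List (Option Int))) (size : Int) : String :=
  let step : String × Int → Int → Int → String × Int := fun st i j =>
    if pvCell grid i j = some none then
      if st.2 < 2 then (st.1 ++ pvMsg solution i j, st.2 + 1) else st
    else st
  ((PySem.List.pyRange 0 size 1).foldl (fun st i =>
      (PySem.List.pyRange 0 size 1).foldl (fun st j => step st i j) st)
    ("Systematically trying values in empty cells:\n", 0)).1

-- ===== PRECONDITION & SPEC =====
-- Pre_: every cell (i,j) with 0 ≤ i,j < size exists in grid, and where it is empty the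
-- corresponding solution cell exists too — exactly where Python A returns without IndexError.
def Pre_backtrack_exploration_analysis_py (grid : List (List (Option Int))) (solution : List (List (Option Int))) (size : Int) : Prop :=
  size.toNat ≤ grid.length ∧
  ∀ i ∈ List.range size.toNat,
    size.toNat ≤ (grid.getD i []).length ∧
    ∀ j ∈ List.range size.toNat,
      ((grid.getD i []).getD j none = none →
        i < solution.length ∧ j < (solution.getD i []).length)
instance (grid : List (List (Option Int))) (solution : List (List (Option Int))) (size : Int) : Decidable (Pre_backtrack_exploration_analysis_py grid solution size) := by unfold Pre_backtrack_exploration_analysis_py; infer_instance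
def pvWitness_backtrack_exploration_analysis_py : List (List (Option Int)) × List (List (Option Int)) × Int :=
  ([[none, some 1], [some 0, none]], [[some 0, some 1], [some 0, some 1]], 2)

def Spec_backtrack_exploration_analysis_py (grid : List (List (Option Int))) (solution : List (List (Option Int))) (size : Int) (out : String) : Prop := out = backtrack_exploration_analysis_py_alt grid solution size
instance (grid : List (List (Option Int))) (solution : List (List (Option Int))) (size : Int) (out : String) : Decidable (Spec_backtrack_exploration_analysis_py grid solution size out) := by unfold Spec_backtrack_exploration_analysis_py; infer_instance

-- ===== CLAIM (what is proved, stated in full; the proofs are below) =====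
def Claim_equal_backtrack_exploration_analysis_py : Prop := ∀ (grid : List (List (Option Int))) (solution : List (List (Option Int))) (size : Int), Dom_backtrack_exploration_analysis_py grid solution size → Pre_backtrack_exploration_analysis_py grid solution size → Spec_backtrack_exploration_analysis_py grid solution size (backtrack_exploration_analysis_py grid solution size)

-- ===== LEMMAS AND PROOFS =====

-- concatenation of a list of strings (proof helper)
def pvConcat : List String → String
  | [] => ""
  | s :: t => s ++ pvConcat t

-- the row-major list of all cells
def pvCells (size : Int) : List (Int × Int) :=
  (PySem.List.pyRange 0 size 1).flatMap (fun i => (PySem.List.pyRange 0 size 1).map (fun j => (i, j)))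

theorem pv_foldl_append (msg : Int × Int → String) (l : List (Int × Int)) (s : String) :
    l.foldl (fun s p => s ++ msg p) s = s ++ pvConcat (l.map msg) := by
  induction l generalizing s with
  | nil => simp [pvConcat]
  | cons p t ih => simp [List.foldl, ih, pvConcat, String.append_assoc]

theorem pv_counted_fold (P : Int × Int → Prop) [DecidablePred P] (msg : Int × Int → String)
    (l : List (Int × Int)) (s : String) (c : Int) :
    (l.foldl (fun st p => if P p then (if st.2 < 2 then (st.1 ++ msg p, st.2 + 1) else st) else st) (s, c)).1
      = s ++ pvConcat ((((l.filter (fun p => decide (P p))).take (2 - c).toNat).map msg)) := by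
  induction l generalizing s c with
  | nil => simp [pvConcat]
  | cons p t ih =>
    rw [List.foldl_cons]
    by_cases hP : P p
    · rw [if_pos hP]
      by_cases hc : c < 2
      · rw [if_pos hc, ih]
        have htn : (2 - c).toNat = (2 - (c + 1)).toNat + 1 := by omega
        rw [List.filter_cons_of_pos (by simp [hP]), htn, List.take_succ_cons, List.map_cons]
        simp [pvConcat, String.append_assoc]
      · rw [if_neg hc, ih]
        have htn : (2 - c).toNat = 0 := by omega
        rw [List.filter_cons_of_pos (by simp [hP]), htn]
        simp
    · rw [if_neg hP, ih, List.filter_cons_of_neg (by simp [hP])]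

theorem pv_empty_cells_eq (grid : List (List (Option Int))) (size : Int) :
    (PySem.List.pyRange 0 size 1).flatMap (fun i =>
      (PySem.List.pyRange 0 size 1).filterMap (fun j =>
        if pvCell grid i j = some none then some (i, j) else none))
    = (pvCells size).filter (fun p => decide (pvCell grid p.1 p.2 = some none)) := by
  unfold pvCells
  rw [List.filter_flatMap]
  refine List.flatMap_congr (fun i _ => ?_)
  rw [List.filter_map]
  induction (PySem.List.pyRange 0 size 1) with
  | nil => simp
  | cons j t ih =>
    by_cases h : pvCell grid i j = some none
    · simp [h, ih, Function.comp]
    · simp [h, ih, Function.comp]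

theorem pv_nested_fold (f : String × Int → Int → Int → String × Int) (st : String × Int)
    (l1 l2 : List Int) :
    l1.foldl (fun st i => l2.foldl (fun st j => f st i j) st) st
      = (l1.flatMap (fun i => l2.map (fun j => (i, j)))).foldl (fun st p => f st p.1 p.2) st := by
  induction l1 generalizing st with
  | nil => simp
  | cons i t ih =>
    rw [List.foldl_cons, List.flatMap_cons, List.foldl_append, List.foldl_map, ih]

theorem pv_slice_take2 (l : List (Int × Int)) :
    PySem.List.slice l (some 0) (some (min 2 (l.length : Int))) = l.take 2 := by
  rw [PySem.List.slice_zero_start, PySem.List.slice_to l (by omega)]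
  have h : (min 2 (l.length : Int)).toNat = min 2 l.length := by omega
  rw [h]
  rcases Nat.le_total 2 l.length with h2 | h2
  · rw [Nat.min_eq_left h2]
  · rw [Nat.min_eq_right h2, List.take_of_length_le h2, List.take_of_length_le (by omega)]

-- ===== VERDICT (by name: the statement is the Claim_ definition above) =====
theorem backtrack_exploration_analysis_py_spec : Claim_equal_backtrack_exploration_analysis_py := by
  intro grid solution size _ _
  unfold Spec_backtrack_exploration_analysis_py backtrack_exploration_analysis_py backtrack_exploration_analysis_py_alt
  simp only [pv_empty_cells_eq, pv_slice_take2,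
    pv_foldl_append (fun p => pvMsg solution p.1 p.2),
    pv_nested_fold, pv_counted_fold (fun p => pvCell grid p.1 p.2 = some none)
      (fun p => pvMsg solution p.1 p.2)]
  rw [← pvCells]
  simp [List.map_take]
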